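-- pv_equiv track=rewrite | github.com/Boburjon2142/bilimcrm | apps/catalog/admin.py | _ean13_bits
-- ===== SOURCE A (Python) =====
-- _EAN13_L_CODES = {
--     "0": "0001101",
--     "1": "0011001",
--     "2": "0010011",
--     "3": "0111101",
--     "4": "0100011",
--     "5": "0110001",
--     "6": "0101111",
--     "7": "0111011",
--     "8": "0110111",
--     "9": "0001011",
-- }
--
-- _EAN13_G_CODES = {
--     "0": "0100111",
--     "1": "0110011",
--     "2": "0011011",
--     "3": "0100001",
--     "4": "0011101",
--     "5": "0111001",
--     "6": "0000101",
--     "7": "0010001",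
--     "8": "0001001",
--     "9": "0010111",
-- }
--
-- _EAN13_R_CODES = {
--     "0": "1110010",
--     "1": "1100110",
--     "2": "1101100",
--     "3": "1000010",
--     "4": "1011100",
--     "5": "1001110",
--     "6": "1010000",
--     "7": "1000100",
--     "8": "1001000",
--     "9": "1110100",
-- }
--
-- _EAN13_PARITY = {
--     "0": "AAAAAA",
--     "1": "AABABB",
--     "2": "AABBAB",
--     "3": "AABBBA",
--     "4": "ABAABB",
--     "5": "ABBAAB",
--     "6": "ABBBAA",
--     "7": "ABABAB",
--     "8": "ABABBA",
--     "9": "ABBABA",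
-- }
--
-- def _ean13_bits(barcode: str) -> str:
--     first = barcode[0]
--     left = barcode[1:7]
--     right = barcode[7:]
--     parity = _EAN13_PARITY[first]
--     bits = "101"
--     for idx, digit in enumerate(left):
--         if parity[idx] == "A":
--             bits += _EAN13_L_CODES[digit]
--         else:
--             bits += _EAN13_G_CODES[digit]
--     bits += "01010"
--     for digit in right:
--         bits += _EAN13_R_CODES[digit]
--     bits += "101"
--     return bits
-- ===== SOURCE B (Python) =====
-- # Single-table re-implementation: R codes are bitwise complements of L codes,
-- # G codes are those complements reversed; assemble groups in a list and join.
-- _L = ["0001101", "0011001", "0010011", "0111101", "0100011",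
--       "0110001", "0101111", "0111011", "0110111", "0001011"]
--
-- _PARITY = ["AAAAAA", "AABABB", "AABBAB", "AABBBA", "ABAABB",
--            "ABBAAB", "ABBBAA", "ABABAB", "ABABBA", "ABBABA"]
--
--
-- def _complement(bits):
--     return "".join("1" if b == "0" else "0" for b in bits)
--
--
-- def _ean13_bits(barcode: str) -> str:
--     parity = _PARITY[int(barcode[0])]
--     groups = ["101"]
--     for p, d in zip(parity, barcode[1:7]):
--         l = _L[int(d)]
--         groups.append(l if p == "A" else _complement(l)[::-1])
--     groups.append("01010")
--     for d in barcode[7:]: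
--         groups.append(_complement(_L[int(d)]))
--     groups.append("101")
--     return "".join(groups)
-- ===== Notes on version B (the rewrite author's own statement) =====
-- stated objective: simpler
-- what changed: Keeps only the L-code table and derives each R code as the bitwise complement of the L code and each G code as that complement reversed, assembling the seven-bit groups in a list joined once instead of three literal dict tables grown by string +=.
import Mathlib
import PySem

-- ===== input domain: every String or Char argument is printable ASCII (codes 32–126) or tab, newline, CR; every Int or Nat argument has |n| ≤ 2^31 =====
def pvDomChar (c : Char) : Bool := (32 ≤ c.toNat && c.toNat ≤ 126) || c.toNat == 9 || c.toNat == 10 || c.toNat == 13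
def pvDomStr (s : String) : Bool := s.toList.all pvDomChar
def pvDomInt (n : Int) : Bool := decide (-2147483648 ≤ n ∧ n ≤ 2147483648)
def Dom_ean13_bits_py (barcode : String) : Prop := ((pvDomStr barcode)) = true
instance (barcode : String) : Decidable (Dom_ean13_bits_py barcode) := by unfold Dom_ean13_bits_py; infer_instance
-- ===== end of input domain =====

-- B replaces A's three literal code dicts by the single L table plus complement/reverse
-- derivations and a list-of-groups join; objective: simpler.

-- ===== PORT A =====
def eanL : PySem.Dict Char (List Char) := PySem.Dict.ofList
  [('0', "0001101".toList), ('1', "0011001".toList), ('2', "0010011".toList),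
   ('3', "0111101".toList), ('4', "0100011".toList), ('5', "0110001".toList),
   ('6', "0101111".toList), ('7', "0111011".toList), ('8', "0110111".toList),
   ('9', "0001011".toList)]

def eanG : PySem.Dict Char (List Char) := PySem.Dict.ofList
  [('0', "0100111".toList), ('1', "0110011".toList), ('2', "0011011".toList),
   ('3', "0100001".toList), ('4', "0011101".toList), ('5', "0111001".toList),
   ('6', "0000101".toList), ('7', "0010001".toList), ('8', "0001001".toList),
   ('9', "0010111".toList)]

def eanR : PySem.Dict Char (List Char) := PySem.Dict.ofList
  [('0', "1110010".toList), ('1', "1100110".toList), ('2', "1101100".toList),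
   ('3', "1000010".toList), ('4', "1011100".toList), ('5', "1001110".toList),
   ('6', "1010000".toList), ('7', "1000100".toList), ('8', "1001000".toList),
   ('9', "1110100".toList)]

def eanParity : PySem.Dict Char (List Char) := PySem.Dict.ofList
  [('0', "AAAAAA".toList), ('1', "AABABB".toList), ('2', "AABBAB".toList),
   ('3', "AABBBA".toList), ('4', "ABAABB".toList), ('5', "ABBAAB".toList),
   ('6', "ABBBAA".toList), ('7', "ABABAB".toList), ('8', "ABABBA".toList),
   ('9', "ABBABA".toList)]

-- literal transliteration of _ean13_bits; dict lookups use .getD [] where Python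
-- would raise KeyError (those inputs are outside Pre_)
def ean13_bits_py (barcode : String) : String :=
  let cs := barcode.toList
  match PySem.List.pyGet? cs 0 with
  | none => ""   -- barcode[0] raises IndexError on the empty string; outside Pre_
  | some first =>
    let left := PySem.List.slice cs (some 1) (some 7)
    let right := PySem.List.slice cs (some 7) none
    let parity := (PySem.Dict.get? eanParity first).getD []
    let bits := ['1', '0', '1']
    let bits := (PySem.List.enumerate left 0).foldl
      (fun b p =>
        if PySem.List.pyGet? parity p.1 = some 'A' then
          b ++ (PySem.Dict.get? eanL p.2).getD []
        else
          b ++ (PySem.Dict.get? eanG p.2).getD []) bits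
    let bits := bits ++ ['0', '1', '0', '1', '0']
    let bits := right.foldl (fun b d => b ++ (PySem.Dict.get? eanR d).getD []) bits
    let bits := bits ++ ['1', '0', '1']
    String.ofList bits

-- ===== PORT B =====
def eanLtab : List (List Char) :=
  ["0001101".toList, "0011001".toList, "0010011".toList, "0111101".toList,
   "0100011".toList, "0110001".toList, "0101111".toList, "0111011".toList,
   "0110111".toList, "0001011".toList]

def eanParityTab : List (List Char) :=
  ["AAAAAA".toList, "AABABB".toList, "AABBAB".toList, "AABBBA".toList,
   "ABAABB".toList, "ABBAAB".toList, "ABBBAA".toList, "ABABAB".toList,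
   "ABABBA".toList, "ABBABA".toList]

-- _complement: ''.join('1' if b == '0' else '0' for b in bits)
def complementB (bits : List Char) : List Char :=
  bits.map (fun b => if b = '0' then '1' else '0')

-- int(d) for a single character; the default is never used on Pre_ inputs
def dval (c : Char) : Int := (PySem.Int.ofChars? [c]).getD 0

-- transliteration of Source B; list indexing uses pyGetD with default [] (unreachable on Pre_)
def ean13_bits_py_alt (barcode : String) : String :=
  let cs := barcode.toList
  match PySem.List.pyGet? cs 0 with
  | none => ""   -- barcode[0] raises IndexError on the empty string; outside Pre_
  | some c0 =>
    let parity := PySem.List.pyGetD eanParityTab (dval c0) []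
    let groups := [['1', '0', '1']]
    let groups := (parity.zip (PySem.List.slice cs (some 1) (some 7))).foldl
      (fun g pd =>
        let l := PySem.List.pyGetD eanLtab (dval pd.2) []
        g ++ [if pd.1 = 'A' then l else (complementB l).reverse]) groups
    let groups := groups ++ [['0', '1', '0', '1', '0']]
    let groups := (PySem.List.slice cs (some 7) none).foldl
      (fun g d => g ++ [complementB (PySem.List.pyGetD eanLtab (dval d) [])]) groups
    let groups := groups ++ [['1', '0', '1']]
    String.ofList groups.flatten   -- ''.join(groups)

-- ===== PRECONDITION & SPEC =====
-- Pre_ excludes exactly the inputs where A raises: the empty string (IndexError on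
-- barcode[0]) and strings with a non-digit character (KeyError in a code-table lookup).
def Pre_ean13_bits_py (barcode : String) : Prop := PySem.Str.strIsdigit barcode = true
instance (barcode : String) : Decidable (Pre_ean13_bits_py barcode) := by
  unfold Pre_ean13_bits_py; infer_instance

def pvWitness_ean13_bits_py : String := "49"

def Spec_ean13_bits_py (barcode : String) (out : String) : Prop := out = ean13_bits_py_alt barcode
instance (barcode : String) (out : String) : Decidable (Spec_ean13_bits_py barcode out) := by unfold Spec_ean13_bits_py; infer_instance

-- ===== CLAIM (what is proved, stated in full; the proofs are below) =====
def Claim_equal_ean13_bits_py : Prop := ∀ (barcode : String), Dom_ean13_bits_py barcode → Pre_ean13_bits_py barcode → Spec_ean13_bits_py barcode (ean13_bits_py barcode)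

-- ===== LEMMAS AND PROOFS =====

-- the ten digit characters
def eanDigits : List Char := ['0', '1', '2', '3', '4', '5', '6', '7', '8', '9']

-- an ASCII digit character is one of the ten digit literals
theorem ean_isdigit_mem (c : Char) (h : PySem.Chars.isdigit c = true) : c ∈ eanDigits := by
  simp only [PySem.Chars.isdigit, Bool.and_eq_true, decide_eq_true_eq] at h
  obtain ⟨h1, h2⟩ := h
  have h48 : 48 ≤ c.toNat := Nat.succ_le_of_lt h1
  have h57 : c.toNat ≤ 57 := Fin.mk_le_mk.mp h2
  have hc : c = Char.ofNat c.toNat := (Char.ofNat_toNat c).symm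
  interval_cases h : c.toNat <;> rw [hc] <;> decide

-- per-digit facts tying A's three extra tables to B's derivations from the L table
theorem ean_digit_L (c : Char) (h : c ∈ eanDigits) :
    (PySem.Dict.get? eanL c).getD [] = PySem.List.pyGetD eanLtab (dval c) [] := by
  fin_cases h <;> decide

theorem ean_digit_G (c : Char) (h : c ∈ eanDigits) :
    (PySem.Dict.get? eanG c).getD []
      = (complementB (PySem.List.pyGetD eanLtab (dval c) [])).reverse := by
  fin_cases h <;> decide

theorem ean_digit_R (c : Char) (h : c ∈ eanDigits) :
    (PySem.Dict.get? eanR c).getD []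
      = complementB (PySem.List.pyGetD eanLtab (dval c) []) := by
  fin_cases h <;> decide

theorem ean_digit_parity (c : Char) (h : c ∈ eanDigits) :
    (PySem.Dict.get? eanParity c).getD [] = PySem.List.pyGetD eanParityTab (dval c) [] := by
  fin_cases h <;> decide

theorem ean_digit_parity_len (c : Char) (h : c ∈ eanDigits) :
    ((PySem.Dict.get? eanParity c).getD []).length = 6 := by
  fin_cases h <;> decide

-- A's enumerate-indexed left loop equals the flatMap over zip that B's group list flattens to
theorem ean_left_loop (left : List Char) : ∀ (k : Nat) (ps : List Char) (acc : List Char),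
    (∀ c ∈ left, c ∈ eanDigits) → k + left.length ≤ ps.length →
    (PySem.List.enumerate left (k : Int)).foldl
      (fun b p =>
        if PySem.List.pyGet? ps p.1 = some 'A' then
          b ++ (PySem.Dict.get? eanL p.2).getD []
        else
          b ++ (PySem.Dict.get? eanG p.2).getD []) acc
    = acc ++ ((ps.drop k).zip left).flatMap
        (fun pd => if pd.1 = 'A' then PySem.List.pyGetD eanLtab (dval pd.2) []
                   else (complementB (PySem.List.pyGetD eanLtab (dval pd.2) [])).reverse) := by
  induction left with
  | nil => intro k ps acc _ _; simp [PySem.List.enumerate_nil]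
  | cons x xs ih =>
    intro k ps acc hd hlen
    have hk : k < ps.length := by simp at hlen; omega
    have hdrop : ps.drop k = ps[k] :: ps.drop (k + 1) := (List.getElem_cons_drop hk).symm
    rw [PySem.List.enumerate_cons, hdrop]
    simp only [List.zip_cons_cons, List.flatMap_cons, List.foldl_cons]
    have hget : PySem.List.pyGet? ps ((k : Int)) = some ps[k] := by
      rw [PySem.List.pyGet?_natCast]; exact List.getElem?_eq_getElem hk
    have hx : x ∈ eanDigits := hd x (List.mem_cons_self)
    have hcast : ((k : Int) + 1) = ((k + 1 : Nat) : Int) := by push_cast; ring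
    rw [hcast]
    rw [ih (k + 1) ps _ (fun c hc => hd c (List.mem_cons_of_mem _ hc)) (by simp at hlen ⊢; omega)]
    by_cases hA : ps[k] = 'A'
    · simp [hget, hA, ean_digit_L x hx]
    · simp [hget, hA, ean_digit_G x hx]

-- ===== VERDICT (by name: the statement is the Claim_ definition above) =====
theorem ean13_bits_py_spec : Claim_equal_ean13_bits_py := by
  intro barcode _ hpre
  unfold Spec_ean13_bits_py ean13_bits_py ean13_bits_py_alt
  unfold Pre_ean13_bits_py at hpre
  rw [PySem.Str.strIsdigit_eq] at hpre
  simp only [PySem.Chars.strIsdigit, Bool.and_eq_true, Bool.not_eq_eq_eq_not, Bool.not_true,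
    List.isEmpty_eq_false_iff, List.all_eq_true] at hpre
  obtain ⟨hne, hdig'⟩ := hpre
  have hdig : ∀ c ∈ barcode.toList, c ∈ eanDigits := fun c hc => ean_isdigit_mem c (hdig' c hc)
  obtain ⟨c0, rest, hcs⟩ : ∃ c0 rest, barcode.toList = c0 :: rest := by
    cases h : barcode.toList with
    | nil => exact absurd h hne
    | cons a l => exact ⟨a, l, rfl⟩
  rw [hcs]
  -- reduce barcode[0]
  simp only [PySem.List.pyGet?_zero_cons]
  -- the slices
  have hsl1 : PySem.List.slice (c0 :: rest) (some 1) (some 7) = rest.take 6 := by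
    rw [show (1:Int) = ((1:Nat):Int) by norm_num, show (7:Int) = ((7:Nat):Int) by norm_num,
        PySem.List.slice_natCast]
    norm_num
  have hsl2 : PySem.List.slice (c0 :: rest) (some 7) none = rest.drop 6 := by
    rw [show (7:Int) = ((7:Nat):Int) by norm_num, PySem.List.slice_from_natCast]
    rw [show (7:Nat) = 6 + 1 from rfl, List.drop_succ_cons]
  rw [hsl1, hsl2]
  have hc0 : c0 ∈ eanDigits := hdig c0 (hcs ▸ List.mem_cons_self)
  have hleftdig : ∀ c ∈ rest.take 6, c ∈ eanDigits := fun c hc =>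
    hdig c (hcs ▸ List.mem_cons_of_mem _ (List.mem_of_mem_take hc))
  have hrightdig : ∀ c ∈ rest.drop 6, c ∈ eanDigits := fun c hc =>
    hdig c (hcs ▸ List.mem_cons_of_mem _ (List.mem_of_mem_drop hc))
  -- left loop: A's enumerate fold = flatMap over zip (via ean_left_loop at k = 0)
  have hlen : (0 : Nat) + (rest.take 6).length ≤ ((PySem.Dict.get? eanParity c0).getD []).length := by
    rw [ean_digit_parity_len c0 hc0]; simp [List.length_take]
  have hleft := ean_left_loop (rest.take 6) 0 ((PySem.Dict.get? eanParity c0).getD [])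
      ['1', '0', '1'] hleftdig hlen
  simp only [Nat.cast_zero, List.drop_zero] at hleft
  rw [hleft]
  -- right loop on the A side: replace the R-table body, then flatten the fold
  rw [PySem.List.foldl_congr_mem (rest.drop 6) _
        (fun b d => b ++ complementB (PySem.List.pyGetD eanLtab (dval d) []))
        _ (fun acc x hx => by rw [ean_digit_R x (hrightdig x hx)])]
  rw [PySem.List.foldl_append_eq_flatMap]
  -- A's parity string is B's
  rw [ean_digit_parity c0 hc0]
  -- B side: group folds become map appends, then flatten
  simp only [PySem.List.foldl_append_singleton_eq_map]
  simp [List.flatten_append, List.flatMap_def]
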